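-- pv_equiv track=rewrite | github.com/ObaraOrg/obara_lab | python_scripts/input_generation_with_clad/generate_fa.py | make_hex
-- ===== SOURCE A (Python) =====
-- from typing import List
--
-- def make_hex(p: int, z: int, n: int) -> List[List[str]]:
--     assert z > 0, "Z must be greater than zero"
--     base_element = f"P{p}Z{z}"
--     external_element = "_co_"
--     center_num_of_elements = n - 2
--     center_array = [
--         external_element,
--         *([base_element] * center_num_of_elements),
--         external_element,
--     ]
--     row_in_dir = (n - 2) // 2
--     # This iterates upwards
--     top_hexagon_inv = [
--         [
--             *([external_element] * (i + 2)),
--             *([base_element] * (center_num_of_elements - i - 1)),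
--             external_element,
--         ]
--         for i in range(row_in_dir)
--     ]
--     top_hexagon = top_hexagon_inv[::-1]
--     bot_hexagon = [row[::-1] for row in top_hexagon_inv]
--     border_row = [*([external_element] * n)]
--     core = [
--         border_row,
--         *top_hexagon,
--         center_array,
--         *bot_hexagon,
--         border_row,
--     ]
--
--     core_row_str = [" ".join(row) for row in core]
--     core_str = "\n".join(core_row_str)
--     return f"{core_str}\n"
-- ===== SOURCE B (Python) =====
-- def make_hex(p: int, z: int, n: int) -> str:
--     assert z > 0, "Z must be greater than zero"
--     base = f"P{p}Z{z}"
--     ext = "_co_"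
--     r = (n - 2) // 2
--     if r < 0:
--         r = 0
--     rows = []
--     for j in range(2 * r + 3):
--         if j == 0 or j == 2 * r + 2:
--             row = [ext] * n
--         elif j == r + 1:
--             row = [ext] + [base] * (n - 2) + [ext]
--         elif j <= r:
--             i = r - j
--             row = [ext] * (i + 2) + [base] * (n - 3 - i) + [ext]
--         else:
--             i = j - r - 2
--             row = [ext] + [base] * (n - 3 - i) + [ext] * (i + 2)
--         rows.append(" ".join(row))
--     return "\n".join(rows) + "\n"
-- ===== Notes on version B (the rewrite author's own statement) =====
-- stated objective: alternative
-- what changed: Replaces A's build-top-rows / reverse-slice / mirror-for-bottom assembly with a single top-to-bottom loop over a global row index that computes each row's left/right external counts arithmetically.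
import Mathlib
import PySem

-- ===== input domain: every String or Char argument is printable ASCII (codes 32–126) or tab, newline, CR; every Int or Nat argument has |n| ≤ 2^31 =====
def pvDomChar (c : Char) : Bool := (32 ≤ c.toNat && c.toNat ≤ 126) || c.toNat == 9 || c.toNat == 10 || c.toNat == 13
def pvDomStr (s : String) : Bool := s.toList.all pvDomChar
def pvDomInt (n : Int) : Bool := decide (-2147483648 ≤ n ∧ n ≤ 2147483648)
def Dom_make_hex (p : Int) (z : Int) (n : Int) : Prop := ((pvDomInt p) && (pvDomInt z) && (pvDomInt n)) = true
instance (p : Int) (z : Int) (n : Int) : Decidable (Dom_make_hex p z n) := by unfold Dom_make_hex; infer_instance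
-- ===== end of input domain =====

-- B replaces A's build/reverse/mirror assembly by one top-to-bottom row loop with arithmetic
-- left/right external counts (objective: alternative decomposition, same cost).

-- ===== PORT A =====
-- Literal port of A.  'assert z > 0' raises for z ≤ 0: excluded by Pre_make_hex.
-- Python '[x] * k' with k possibly negative gives []: List.replicate k.toNat is exact.
-- 'xs[::-1]' is List.reverse (PySem.List.slice?_none_none_neg_one).
def make_hex (p : Int) (z : Int) (n : Int) : String :=
  let base_element : String := "P" ++ PySem.Int.toStr p ++ "Z" ++ PySem.Int.toStr z
  let external_element : String := "_co_"
  let center_num_of_elements := n - 2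
  let center_array : List String :=
    [external_element] ++ List.replicate center_num_of_elements.toNat base_element ++ [external_element]
  let row_in_dir := PySem.Int.floordiv (n - 2) 2
  let top_hexagon_inv : List (List String) :=
    (PySem.List.pyRange 0 row_in_dir 1).map (fun i =>
      List.replicate (i + 2).toNat external_element ++
      List.replicate (center_num_of_elements - i - 1).toNat base_element ++ [external_element])
  let top_hexagon := top_hexagon_inv.reverse
  let bot_hexagon := top_hexagon_inv.map (fun row => row.reverse)
  let border_row : List String := List.replicate n.toNat external_element
  let core : List (List String) :=
    [border_row] ++ top_hexagon ++ [center_array] ++ bot_hexagon ++ [border_row]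
  let core_row_str := core.map (fun row => PySem.Str.join " " row)
  let core_str := PySem.Str.join "\n" core_row_str
  core_str ++ "\n"

-- ===== PORT B =====
-- Literal port of Source B ('assert z > 0' likewise excluded by Pre_; appending loop = map over range).
def make_hex_alt (p : Int) (z : Int) (n : Int) : String :=
  let base : String := "P" ++ PySem.Int.toStr p ++ "Z" ++ PySem.Int.toStr z
  let ext : String := "_co_"
  let r0 := PySem.Int.floordiv (n - 2) 2
  let r := if r0 < 0 then 0 else r0
  let rows : List String :=
    (PySem.List.pyRange 0 (2 * r + 3) 1).map (fun j =>
      let row : List String :=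
        if j = 0 ∨ j = 2 * r + 2 then List.replicate n.toNat ext
        else if j = r + 1 then [ext] ++ List.replicate (n - 2).toNat base ++ [ext]
        else if j ≤ r then
          let i := r - j
          List.replicate (i + 2).toNat ext ++ List.replicate (n - 3 - i).toNat base ++ [ext]
        else
          let i := j - r - 2
          [ext] ++ List.replicate (n - 3 - i).toNat base ++ List.replicate (i + 2).toNat ext
      PySem.Str.join " " row)
  PySem.Str.join "\n" rows ++ "\n"

-- ===== PRECONDITION & SPEC =====
-- Pre_ excludes exactly the inputs where A's 'assert z > 0' raises AssertionError (B asserts the same).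
def Pre_make_hex (p : Int) (z : Int) (n : Int) : Prop := 0 < z
instance (p : Int) (z : Int) (n : Int) : Decidable (Pre_make_hex p z n) := by unfold Pre_make_hex; infer_instance
def pvWitness_make_hex : Int × Int × Int := (1, 2, 7)
def Spec_make_hex (p : Int) (z : Int) (n : Int) (out : String) : Prop := out = make_hex_alt p z n
instance (p : Int) (z : Int) (n : Int) (out : String) : Decidable (Spec_make_hex p z n out) := by unfold Spec_make_hex; infer_instance

-- ===== CLAIM (what is proved, stated in full; the proofs are below) =====
def Claim_equal_make_hex : Prop := ∀ (p : Int) (z : Int) (n : Int), Dom_make_hex p z n → Pre_make_hex p z n → Spec_make_hex p z n (make_hex p z n)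

-- ===== LEMMAS AND PROOFS =====

theorem pv_rows_eq {α : Type} (e b : α) (n : Int) :
    ([List.replicate n.toNat e] ++
      ((PySem.List.pyRange 0 (PySem.Int.floordiv (n - 2) 2) 1).map (fun i =>
        List.replicate (i + 2).toNat e ++
        List.replicate ((n - 2) - i - 1).toNat b ++ [e])).reverse ++
      [[e] ++ List.replicate (n - 2).toNat b ++ [e]] ++
      ((PySem.List.pyRange 0 (PySem.Int.floordiv (n - 2) 2) 1).map (fun i =>
        List.replicate (i + 2).toNat e ++
        List.replicate ((n - 2) - i - 1).toNat b ++ [e])).map List.reverse ++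
      [List.replicate n.toNat e]) =
    (PySem.List.pyRange 0 (2 * (if PySem.Int.floordiv (n - 2) 2 < 0 then 0 else PySem.Int.floordiv (n - 2) 2) + 3) 1).map
      (fun j =>
        if j = 0 ∨ j = 2 * (if PySem.Int.floordiv (n - 2) 2 < 0 then 0 else PySem.Int.floordiv (n - 2) 2) + 2 then
          List.replicate n.toNat e
        else if j = (if PySem.Int.floordiv (n - 2) 2 < 0 then 0 else PySem.Int.floordiv (n - 2) 2) + 1 then
          [e] ++ List.replicate (n - 2).toNat b ++ [e]
        else if j ≤ (if PySem.Int.floordiv (n - 2) 2 < 0 then 0 else PySem.Int.floordiv (n - 2) 2) then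
          List.replicate ((if PySem.Int.floordiv (n - 2) 2 < 0 then 0 else PySem.Int.floordiv (n - 2) 2) - j + 2).toNat e ++
          List.replicate (n - 3 - ((if PySem.Int.floordiv (n - 2) 2 < 0 then 0 else PySem.Int.floordiv (n - 2) 2) - j)).toNat b ++ [e]
        else
          [e] ++ List.replicate (n - 3 - (j - (if PySem.Int.floordiv (n - 2) 2 < 0 then 0 else PySem.Int.floordiv (n - 2) 2) - 2)).toNat b ++
          List.replicate ((j - (if PySem.Int.floordiv (n - 2) 2 < 0 then 0 else PySem.Int.floordiv (n - 2) 2) - 2) + 2).toNat e) := by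
  have hmap : ∀ {β : Type} (c : Int) (f : Int → β),
      (PySem.List.pyRange 0 c 1).map f = (List.range c.toNat).map (fun (k : Nat) => f (k : Int)) := by
    intro β c f; rw [PySem.List.pyRange_one]; simp [← List.map_eq_flatMap]
  have hif : (if PySem.Int.floordiv (n - 2) 2 < 0 then 0 else PySem.Int.floordiv (n - 2) 2)
      = (((PySem.Int.floordiv (n - 2) 2).toNat : Nat) : Int) := by split_ifs with h <;> omega
  rw [hif, hmap, hmap,
    show ((2 : Int) * (((PySem.Int.floordiv (n - 2) 2).toNat : Nat) : Int) + 3).toNat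
      = 2 * (PySem.Int.floordiv (n - 2) 2).toNat + 3 by omega]
  generalize (PySem.Int.floordiv (n - 2) 2).toNat = R
  apply List.ext_getElem
  · simp; omega
  · intro j h1 h2
    simp only [List.getElem_map, List.getElem_range, List.getElem_append, List.getElem_reverse,
      List.length_map, List.length_range, List.length_reverse, List.length_append,
      List.length_cons, List.length_nil, List.getElem_cons_zero] at h1 h2 ⊢
    split_ifs
    all_goals try (exfalso; omega)
    · simp [show j = 0 from by omega]
    · rw [show (↑(R - 1 - (j - (0 + 1))) + 2 : Int).toNat = ((↑R : Int) - ↑j + 2).toNat from by omega,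
          show (n - 2 - ↑(R - 1 - (j - (0 + 1))) - 1 : Int) = (n - 3 - ((↑R : Int) - ↑j)) from by omega]
    · simp [show j - (0 + 1 + R) = 0 from by omega]
    · simp only [List.reverse_append, List.reverse_replicate, List.reverse_cons, List.reverse_nil,
        List.nil_append, List.append_assoc]
      rw [show (n - 2 - ↑(j - (0 + 1 + R + (0 + 1))) - 1 : Int) = (n - 3 - ((↑j : Int) - ↑R - 2)) from by omega,
          show (↑(j - (0 + 1 + R + (0 + 1))) + 2 : Int).toNat = ((↑j : Int) - ↑R - 2 + 2).toNat from by omega]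
    · simp [show j - (0 + 1 + R + (0 + 1) + R) = 0 from by omega]

-- ===== VERDICT (by name: the statement is the Claim_ definition above) =====
theorem make_hex_spec : Claim_equal_make_hex := by
  intro p z n _ _
  unfold Spec_make_hex
  simp only [make_hex, make_hex_alt]
  congr 1
  congr 1
  rw [pv_rows_eq ("_co_" : String) ("P" ++ PySem.Int.toStr p ++ "Z" ++ PySem.Int.toStr z) n]
  simp [List.map_map, Function.comp]
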